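-- pv_equiv track=rewrite | github.com/olsenw/LeetCodeExercises | Python3/distribute_candies_amoung_children_II.py | distributeCandies_brute
-- ===== SOURCE A (Python) =====
-- def distributeCandies_brute(n: int, limit: int) -> int:
--     answer = 0
--     for i in range(min(n, limit) + 1):
--         for j in range(min(n-i,limit) + 1):
--             for k in range(min(n-i-j,limit)+1):
--                 if i + j + k == n:
--                     answer += 1
--     return answer
-- ===== SOURCE B (Python) =====
-- def distributeCandies_brute(n: int, limit: int) -> int:
--     # Faster: inner two loops replaced by a closed-form interval count per i.
--     answer = 0
--     for i in range(min(n, limit) + 1):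
--         m = n - i
--         answer += max(0, min(m, limit) - max(0, m - limit) + 1)
--     return answer
-- ===== Notes on version B (the rewrite author's own statement) =====
-- stated objective: faster
-- what changed: The two inner nested loops over j and k are replaced by a closed-form interval count per i (number of j with max(0,m-limit) <= j <= min(m,limit)), turning the triple loop into a single loop.
import Mathlib
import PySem

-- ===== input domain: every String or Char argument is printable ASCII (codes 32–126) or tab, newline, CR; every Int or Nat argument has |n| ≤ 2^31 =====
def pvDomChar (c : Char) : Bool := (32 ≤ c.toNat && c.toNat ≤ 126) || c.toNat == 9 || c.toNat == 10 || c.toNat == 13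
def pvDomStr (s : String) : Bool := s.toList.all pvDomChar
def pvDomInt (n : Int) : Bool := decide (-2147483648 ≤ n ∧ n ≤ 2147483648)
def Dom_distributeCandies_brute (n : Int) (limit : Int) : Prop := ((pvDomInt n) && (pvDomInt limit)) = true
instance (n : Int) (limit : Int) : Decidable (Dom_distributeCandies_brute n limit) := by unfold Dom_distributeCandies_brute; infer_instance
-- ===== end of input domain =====

-- B replaces A's two inner nested loops by a closed-form interval count per i (faster, measured).


-- ===== PORT A =====
def distributeCandies_brute (n : Int) (limit : Int) : Int :=
  (PySem.List.pyRange 0 (min n limit + 1) 1).foldl (fun answer i =>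
    (PySem.List.pyRange 0 (min (n - i) limit + 1) 1).foldl (fun answer j =>
      (PySem.List.pyRange 0 (min (n - i - j) limit + 1) 1).foldl (fun answer k =>
        if i + j + k = n then answer + 1 else answer) answer) answer) 0

-- ===== PORT B =====
def distributeCandies_brute_alt (n : Int) (limit : Int) : Int :=
  (PySem.List.pyRange 0 (min n limit + 1) 1).foldl (fun answer i =>
    answer + max 0 (min (n - i) limit - max 0 (n - i - limit) + 1)) 0

-- ===== PRECONDITION & SPEC =====
def Spec_distributeCandies_brute (n : Int) (limit : Int) (out : Int) : Prop := out = distributeCandies_brute_alt n limit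
instance (n : Int) (limit : Int) (out : Int) : Decidable (Spec_distributeCandies_brute n limit out) := by unfold Spec_distributeCandies_brute; infer_instance

-- ===== CLAIM (what is proved, stated in full; the proofs are below) =====
def Claim_equal_distributeCandies_brute : Prop := ∀ (n : Int) (limit : Int), Dom_distributeCandies_brute n limit → Spec_distributeCandies_brute n limit (distributeCandies_brute n limit)

-- ===== LEMMAS AND PROOFS =====

-- counting the j in [0,t) with L ≤ j
theorem pv_countP_ge (L : Int) (t : Nat) :
    (((PySem.List.pyRange 0 (t : Int) 1).countP (fun j => decide (L ≤ j))) : Int)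
      = max 0 ((t : Int) - max 0 L) := by
  induction t with
  | zero => simp [PySem.List.pyRange_one_eq_nil]
  | succ t ih =>
    rw [show ((t + 1 : Nat) : Int) = (t : Int) + 1 by push_cast; ring,
      PySem.List.pyRange_one_succ_right (by positivity), List.countP_append]
    simp only [List.countP_singleton, decide_eq_true_eq]
    by_cases h : L ≤ (t : Int)
    · rw [if_pos h]; push_cast; omega
    · rw [if_neg h]; push_cast; omega

-- the k-loop counts exactly one triple when n-i-j ≤ limit, none otherwise
theorem pv_kcount (n i j limit : Int) (hc : 0 ≤ n - i - j) :
    (((PySem.List.pyRange 0 (min (n - i - j) limit + 1) 1).countP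
        (fun k => decide (i + j + k = n))) : Int)
      = if n - i - j ≤ limit then 1 else 0 := by
  have hcong : ∀ k ∈ PySem.List.pyRange 0 (min (n - i - j) limit + 1) 1,
      (decide (i + j + k = n) = true ↔ decide (n - i - j ≤ k) = true) := by
    intro k hk
    rw [PySem.List.mem_pyRange_one] at hk
    simp only [decide_eq_true_eq]
    omega
  rw [List.countP_congr hcong]
  have ht : (min (n - i - j) limit + 1) = (((min (n - i - j) limit + 1).toNat : Nat) : Int) ∨
      (min (n - i - j) limit + 1 < 0 ∧
        PySem.List.pyRange 0 (min (n - i - j) limit + 1) 1 = []) := by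
    by_cases h : 0 ≤ min (n - i - j) limit + 1
    · left; omega
    · exact Or.inr ⟨by omega, PySem.List.pyRange_one_eq_nil (by omega)⟩
  rcases ht with ht | ⟨hneg, ht⟩
  · rw [ht, pv_countP_ge]
    omega
  · rw [ht]
    simp only [List.countP_nil]
    omega

-- for admissible i, A's inner double loop adds B's closed-form interval count
theorem pv_inner (n limit i : Int) (hin : i ≤ n)
    (hl : 0 ≤ limit) (answer : Int) :
    (PySem.List.pyRange 0 (min (n - i) limit + 1) 1).foldl (fun answer j =>
      (PySem.List.pyRange 0 (min (n - i - j) limit + 1) 1).foldl (fun answer k =>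
        if i + j + k = n then answer + 1 else answer) answer) answer
      = answer + max 0 (min (n - i) limit - max 0 (n - i - limit) + 1) := by
  have hstep : ∀ (acc : Int), ∀ (j : Int), j ∈ PySem.List.pyRange 0 (min (n - i) limit + 1) 1 →
      (PySem.List.pyRange 0 (min (n - i - j) limit + 1) 1).foldl (fun answer k =>
        if i + j + k = n then answer + 1 else answer) acc
      = if n - i - limit ≤ j then acc + 1 else acc := by
    intro acc j hj
    rw [PySem.List.mem_pyRange_one] at hj
    rw [PySem.List.foldl_ite_add_one, pv_kcount n i j limit (by omega)]
    by_cases h : n - i - limit ≤ j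
    · rw [if_pos h, if_pos (by omega)]
    · rw [if_neg h, if_neg (by omega)]
      ring
  rw [PySem.List.foldl_congr_mem _ _
    (fun acc j => if n - i - limit ≤ j then acc + 1 else acc) _ hstep]
  rw [PySem.List.foldl_ite_add_one]
  have ht : (min (n - i) limit + 1) = (((min (n - i) limit + 1).toNat : Nat) : Int) := by omega
  rw [ht, pv_countP_ge]
  omega

-- ===== VERDICT (by name: the statement is the Claim_ definition above) =====
theorem distributeCandies_brute_spec : Claim_equal_distributeCandies_brute := by
  intro n limit _
  unfold Spec_distributeCandies_brute distributeCandies_brute distributeCandies_brute_alt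
  apply PySem.List.foldl_congr_mem
  intro acc i hi
  rw [PySem.List.mem_pyRange_one] at hi
  exact pv_inner n limit i (by omega) (by omega) acc
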